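-- pv_equiv track=rewrite | github.com/DryHop2/aoc-2025 | day06.py | find_problems
-- ===== SOURCE A (Python) =====
-- def column_is_blank(grid: list[list[str]], c: int) -> bool:
--     return all(row[c] == " " for row in grid)
--
-- def find_problems(grid: list[list[str]]) -> list[list[int]]:
--     rows, cols = len(grid), len(grid[0])
--     problems: list[list[int]] = []
--
--     c = cols - 1
--     while c >= 0:
--         if column_is_blank(grid, c):
--             c -= 1
--             continue
--
--         problem_cols: list[int] = []
--         while c >= 0 and not column_is_blank(grid, c):
--             problem_cols.append(c)
--             c -= 1
--
--         problems.append(problem_cols)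
--
--     return problems
-- ===== SOURCE B (Python) =====
-- def find_problems(grid: list[list[str]]) -> list[list[int]]:
--     cols = len(grid[0])
--     blank = [all(row[c] == " " for row in grid) for c in range(cols)]
--     runs: list[list[int]] = []
--     current: list[int] = []
--     for c in range(cols):
--         if blank[c]:
--             if current:
--                 runs.append(current)
--                 current = []
--         else:
--             current.append(c)
--     if current:
--         runs.append(current)
--     return [run[::-1] for run in reversed(runs)]
-- ===== Notes on version B (the rewrite author's own statement) =====
-- stated objective: alternative
-- what changed: B precomputes a per-column blank table and then groups the non-blank columns in a single left-to-right pass with a runs/current accumulator, reversing runs and their contents at the end, instead of A's right-to-left nested while loops that re-test boundary columns with column_is_blank.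
import Mathlib
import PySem

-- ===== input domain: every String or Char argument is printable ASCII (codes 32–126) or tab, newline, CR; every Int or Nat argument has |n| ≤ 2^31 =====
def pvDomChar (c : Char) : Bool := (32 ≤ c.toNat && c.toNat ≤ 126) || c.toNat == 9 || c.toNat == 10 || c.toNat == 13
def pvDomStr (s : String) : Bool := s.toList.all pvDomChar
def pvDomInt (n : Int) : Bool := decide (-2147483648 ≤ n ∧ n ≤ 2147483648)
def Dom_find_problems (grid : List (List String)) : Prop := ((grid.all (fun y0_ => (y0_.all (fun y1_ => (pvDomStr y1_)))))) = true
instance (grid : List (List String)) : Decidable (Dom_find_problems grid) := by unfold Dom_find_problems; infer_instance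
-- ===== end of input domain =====

-- B precomputes a per-column blank table, then groups non-blank columns in one
-- left-to-right pass and reverses at the end, instead of A's right-to-left nested
-- while loops that re-check boundary columns; objective: alternative decomposition.


-- ===== PORT A =====
-- all(row[c] == " " for row in grid); row[c] may raise IndexError in Python (Pre_ excludes)
def column_is_blank (grid : List (List String)) (c : Int) : Bool :=
  grid.all (fun row => PySem.List.pyGet? row c == some " ")

-- inner while loop of A: column index c = n - 1 counts down collecting non-blank columns;
-- returns (problem_cols, c + 1 after the loop)
def pv_innerA (grid : List (List String)) : Nat → List Int × Nat
  | 0 => ([], 0)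
  | n + 1 =>
    if column_is_blank grid (n : Int) then ([], n + 1)
    else
      let r := pv_innerA grid n
      (((n : Int) :: r.1), r.2)

-- termination measure for the outer loop (cited by pv_outerA's decreasing_by)
theorem pv_innerA_snd_le (grid : List (List String)) (n : Nat) : (pv_innerA grid n).2 ≤ n := by
  induction n with
  | zero => simp [pv_innerA]
  | succ m ih =>
    simp only [pv_innerA]
    split
    · simp
    · simpa using Nat.le_succ_of_le ih

-- outer while loop of A, c = n - 1
def pv_outerA (grid : List (List String)) : Nat → List (List Int)
  | 0 => []
  | n + 1 =>
    if column_is_blank grid (n : Int) then pv_outerA grid n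
    else
      let r := pv_innerA grid (n + 1)
      r.1 :: pv_outerA grid r.2
  termination_by n => n
  decreasing_by
  · exact Nat.lt_succ_self n
  · rename_i h
    have he : pv_innerA grid (n + 1) =
        (((n : Int) :: (pv_innerA grid n).1), (pv_innerA grid n).2) := by
      rw [pv_innerA, if_neg h]
    rw [he]
    exact Nat.lt_succ_of_le (pv_innerA_snd_le grid n)

-- Python's len(grid[0]) raises IndexError on [] (excluded by Pre_); headD [] gives length 0 there
def find_problems (grid : List (List String)) : List (List Int) :=
  pv_outerA grid (grid.headD []).length

-- ===== PORT B =====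
-- blank = [all(row[c] == " " for row in grid) for c in range(cols)]
def pv_blankTable (grid : List (List String)) (cols : Nat) : List Bool :=
  (List.range cols).map (fun (c : Nat) => grid.all (fun row => PySem.List.pyGet? row (c : Int) == some " "))

-- one step of B's for-loop, state (runs, current)
def pv_stepB (blank : List Bool) (st : List (List Int) × List Int) (c : Nat) :
    List (List Int) × List Int :=
  if blank.getD c false then
    if st.2 ≠ [] then (st.1 ++ [st.2], []) else st
  else (st.1, st.2 ++ [(c : Int)])

def find_problems_alt (grid : List (List String)) : List (List Int) :=
  let cols := (grid.headD []).length
  let blank := pv_blankTable grid cols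
  let st := (List.range cols).foldl (pv_stepB blank) ([], [])
  let runs := if st.2 ≠ [] then st.1 ++ [st.2] else st.1
  runs.reverse.map List.reverse

-- ===== PRECONDITION & SPEC =====
-- Pre_ excludes exactly the inputs where the Python raises IndexError: the empty grid
-- (len(grid[0])), and ragged grids where, for some column c < len(grid[0]), the first row at
-- which all()'s scan of row[c] == " " stops is a row shorter than c+1 (row[c] raises there).
-- A and B raise on exactly the same inputs, so nothing A returns on is excluded.
def Pre_find_problems (grid : List (List String)) : Prop :=
  grid ≠ [] ∧ ∀ c ∈ List.range (grid.headD []).length,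
    ∀ row ∈ grid.find? (fun row => !(PySem.List.pyGet? row (c : Int) == some " ")),
      c < row.length
instance (grid : List (List String)) : Decidable (Pre_find_problems grid) := by unfold Pre_find_problems; infer_instance
def pvWitness_find_problems : List (List String) :=
  [["1", " ", "2", "3"], ["4", " ", " ", "5"]]
def Spec_find_problems (grid : List (List String)) (out : List (List Int)) : Prop := out = find_problems_alt grid
instance (grid : List (List String)) (out : List (List Int)) : Decidable (Spec_find_problems grid out) := by unfold Spec_find_problems; infer_instance

-- ===== CLAIM (what is proved, stated in full; the proofs are below) =====
def Claim_equal_find_problems : Prop := ∀ (grid : List (List String)), Dom_find_problems grid → Pre_find_problems grid → Spec_find_problems grid (find_problems grid)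

-- ===== LEMMAS AND PROOFS =====

theorem pv_blank_getD (grid : List (List String)) (cols c : Nat) (hc : c < cols) :
    (pv_blankTable grid cols).getD c false = column_is_blank grid (c : Int) := by
  unfold pv_blankTable column_is_blank
  rw [List.getD_eq_getElem?_getD, List.getElem?_map, List.getElem?_range hc]
  rfl

-- pv_innerA stops immediately at a blank column (or at 0)
theorem pv_innerA_stop (grid : List (List String)) (n : Nat)
    (h : n = 0 ∨ column_is_blank grid ((n : Int) - 1) = true) :
    pv_innerA grid n = ([], n) := by
  cases n with
  | zero => rfl
  | succ m =>
    rcases h with h | h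
    · omega
    · have hm : column_is_blank grid (m : Int) = true := by
        have he : ((m + 1 : Nat) : Int) - 1 = (m : Int) := by push_cast; ring
        rwa [he] at h
      simp [pv_innerA, hm]

-- the main invariant: A's top-down recursion equals B's fold state, read back-to-front
theorem pv_invariant (grid : List (List String)) (cols : Nat) (n : Nat) (hn : n ≤ cols) :
    pv_outerA grid n =
      ((if ((List.range n).foldl (pv_stepB (pv_blankTable grid cols)) ([], [])).2 ≠ []
          then ((List.range n).foldl (pv_stepB (pv_blankTable grid cols)) ([], [])).1
            ++ [((List.range n).foldl (pv_stepB (pv_blankTable grid cols)) ([], [])).2]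
          else ((List.range n).foldl (pv_stepB (pv_blankTable grid cols)) ([], [])).1).reverse).map List.reverse
    ∧ (((List.range n).foldl (pv_stepB (pv_blankTable grid cols)) ([], [])).2 = []
        ↔ (n = 0 ∨ column_is_blank grid ((n : Int) - 1) = true)) := by
  induction n with
  | zero =>
    constructor
    · rw [pv_outerA]; rfl
    · simp
  | succ m ih =>
    have hm : m ≤ cols := Nat.le_of_succ_le hn
    obtain ⟨ih1, ih2⟩ := ih hm
    set blank := pv_blankTable grid cols with hblank
    set st := (List.range m).foldl (pv_stepB blank) ([], []) with hst
    have hfold : (List.range (m + 1)).foldl (pv_stepB blank) ([], []) =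
        pv_stepB blank st m := by
      rw [List.range_succ, List.foldl_append]; rfl
    have hlook : blank.getD m false = column_is_blank grid (m : Int) :=
      pv_blank_getD grid cols m (by omega)
    have hcast : ((m + 1 : Nat) : Int) - 1 = (m : Int) := by push_cast; ring
    by_cases hb : column_is_blank grid (m : Int) = true
    · -- column m blank: A skips it, B flushes current (merged list unchanged)
      have hstep : pv_stepB blank st m =
          (if st.2 ≠ [] then (st.1 ++ [st.2], []) else st) := by
        unfold pv_stepB
        rw [hlook, hb]
        simp
      have hA : pv_outerA grid (m + 1) = pv_outerA grid m := by
        rw [pv_outerA]; simp [hb]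
      constructor
      · rw [hfold, hstep, hA]
        by_cases hc : st.2 = [] <;> simp [hc, ih1]
      · rw [hfold, hstep]
        by_cases hc : st.2 = [] <;> simp [hc, hb]
    · -- column m non-blank: A's head run gains m at the front, B's current gains m at the back
      have hstep : pv_stepB blank st m = (st.1, st.2 ++ [(m : Int)]) := by
        unfold pv_stepB
        rw [hlook]
        simp [hb]
      have houter : pv_outerA grid (m + 1) =
          (pv_innerA grid (m + 1)).1 :: pv_outerA grid (pv_innerA grid (m + 1)).2 := by
        rw [pv_outerA]; simp [hb]
      refine ⟨?_, ?_⟩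
      · rw [hfold, hstep]
        by_cases hc : st.2 = []
        · -- current was empty: pv_innerA (m+1) stops after one step
          have hstop : pv_innerA grid m = ([], m) := pv_innerA_stop grid m (ih2.mp hc)
          have hinner : pv_innerA grid (m + 1) = ([(m : Int)], m) := by
            simp [pv_innerA, hb, hstop]
          rw [houter, hinner]
          rw [ih1]
          simp [hc]
        · -- current nonempty: m is prepended to the head run of pv_outerA m
          have hm0 : m ≠ 0 := fun h0 => hc (ih2.mpr (Or.inl h0))
          have hbm : ¬ column_is_blank grid ((m : Int) - 1) = true :=
            fun h0 => hc (ih2.mpr (Or.inr h0))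
          have hAm : pv_outerA grid m =
              (pv_innerA grid m).1 :: pv_outerA grid (pv_innerA grid m).2 := by
            obtain ⟨k, rfl⟩ := Nat.exists_eq_succ_of_ne_zero hm0
            have hek : ((k + 1 : Nat) : Int) - 1 = (k : Int) := by push_cast; ring
            rw [hek] at hbm
            rw [pv_outerA]; simp [hbm]
          have hinner : pv_innerA grid (m + 1) =
              ((m : Int) :: (pv_innerA grid m).1, (pv_innerA grid m).2) := by
            simp [pv_innerA, hb]
          have hEq := ih1.symm.trans hAm
          rw [if_pos hc] at hEq
          simp only [List.reverse_append, List.reverse_cons, List.reverse_nil,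
            List.nil_append, List.singleton_append, List.map_cons] at hEq
          obtain ⟨h1, h2⟩ := List.cons_eq_cons.mp hEq
          rw [houter, hinner]
          have hne : st.2 ++ [(m : Int)] ≠ [] := by simp
          rw [if_pos hne]
          simp only [List.reverse_append, List.reverse_cons, List.reverse_nil,
            List.nil_append, List.singleton_append, List.map_cons]
          rw [← h1, ← h2]
      · rw [hfold, hstep, hcast]
        simp [hb]

-- ===== VERDICT (by name: the statement is the Claim_ definition above) =====
theorem find_problems_spec : Claim_equal_find_problems := by
  intro grid _ _
  unfold Spec_find_problems find_problems find_problems_alt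
  exact (pv_invariant grid (grid.headD []).length (grid.headD []).length le_rfl).1
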